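-- pv_equiv track=rewrite | github.com/matt76k/zumo | zumo/Utils.py | getSyuntu
-- ===== SOURCE A (Python) =====
-- def getSyuntu(tehai):
--     hand = sorted(list(set(tehai)))
--     if len(hand) < 3:
--         return []
--     elif (hand[2] - hand[1] == 1) and (hand[1] - hand[0] == 1):
--         t = tehai.copy()
--         t.remove(hand[0])
--         t.remove(hand[1])
--         t.remove(hand[2])
--         return [hand[0:3]] + getSyuntu(t)
--     else:
--         return getSyuntu(hand[1:])
-- ===== SOURCE B (Python) =====
-- def getSyuntu(tehai):
--     s = sorted(tehai)
--     result = []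
--     while True:
--         hand = []
--         prev = None
--         for v in s:
--             if v != prev:
--                 hand.append(v)
--                 prev = v
--         if len(hand) < 3:
--             return result
--         a, b, c = hand[0], hand[1], hand[2]
--         if b - a == 1 and c - b == 1:
--             result.append([a, b, c])
--             t = []
--             skip = [a, b, c]
--             for v in s:
--                 if skip and v == skip[0]:
--                     skip.pop(0)
--                 else:
--                     t.append(v)
--             s = t
--         else:
--             s = hand[1:]
-- ===== Notes on version B (the rewrite author's own statement) =====
-- stated objective: alternative
-- what changed: B sorts the hand once up front and dedups adjacent duplicates instead of recomputing sorted(set(state)) at every level, rebuilds the state with a single skip-pass instead of three .remove scans, and accumulates the triples in an iterative loop instead of A's recursion with list concatenation.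
import Mathlib
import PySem

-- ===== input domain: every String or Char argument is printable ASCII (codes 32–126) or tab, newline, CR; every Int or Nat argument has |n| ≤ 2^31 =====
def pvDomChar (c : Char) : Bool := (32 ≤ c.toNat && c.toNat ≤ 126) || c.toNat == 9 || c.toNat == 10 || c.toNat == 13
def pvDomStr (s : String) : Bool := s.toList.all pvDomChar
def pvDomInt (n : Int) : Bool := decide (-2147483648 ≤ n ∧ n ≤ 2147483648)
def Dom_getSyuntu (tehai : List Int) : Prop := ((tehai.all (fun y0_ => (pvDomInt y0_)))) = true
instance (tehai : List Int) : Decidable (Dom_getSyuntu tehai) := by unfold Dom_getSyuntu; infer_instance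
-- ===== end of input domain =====

-- B sorts the hand once, dedups adjacent duplicates instead of set()+sorted() at every level,
-- rebuilds the state in one skip-pass instead of three .remove scans, and accumulates the
-- triples iteratively instead of recursively (alternative decomposition, same cost).

-- ===== PORT A =====
-- hand = sorted(set(tehai)) (set iteration order is not consumed: sorting without a key is
-- order-independent, so this is exact)
def pvHand (xs : List Int) : List Int :=
  PySem.List.sorted (PySem.Set.ofList xs) (fun x => x) false

-- t = xs.copy(); t.remove(a); t.remove(b); t.remove(c) — the three sequential removes A
-- performs; none = ValueError on any of them (in fact unreachable: a,b,c come from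
-- sorted(set(xs)), so each occurs in the list it is removed from)
def pvRemove3 (xs : List Int) (a b c : Int) : Option (List Int) :=
  (PySem.List.remove? xs a).bind fun t1 =>
    (PySem.List.remove? t1 b).bind fun t2 =>
      PySem.List.remove? t2 c

-- termination helpers (cited by decreasing_by of port A)
theorem pvRemoveLen {xs ys : List Int} {v : Int}
    (h : PySem.List.remove? xs v = some ys) : ys.length < xs.length := by
  have hv : v ∈ xs := by
    by_contra hv
    rw [(PySem.List.remove?_eq_none_iff xs v).mpr hv] at h
    cases h
  rw [PySem.List.remove?_eq_some_erase xs v hv] at h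
  cases h
  have h1 := List.length_erase_of_mem hv
  have h2 : 0 < xs.length := List.length_pos_of_mem hv
  omega

theorem pvRemove3Len {xs t : List Int} {a b c : Int}
    (h : pvRemove3 xs a b c = some t) : t.length < xs.length := by
  rw [pvRemove3] at h
  cases h1 : PySem.List.remove? xs a with
  | none => simp [h1] at h
  | some t1 =>
    rw [h1] at h; simp only [Option.bind_some] at h
    cases h2 : PySem.List.remove? t1 b with
    | none => simp [h2] at h
    | some t2 =>
      rw [h2] at h; simp only [Option.bind_some] at h
      have := pvRemoveLen h1
      have := pvRemoveLen h2
      have := pvRemoveLen h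
      omega

theorem pvFoldAddLen (xs : List Int) : ∀ s : List Int,
    (xs.foldl PySem.Set.add s).length ≤ s.length + xs.length := by
  induction xs with
  | nil => intro s; simp
  | cons x xs ih =>
    intro s
    have h1 : (PySem.Set.add s x).length ≤ s.length + 1 := by
      simp [PySem.Set.add]; split <;> simp
    have := ih (PySem.Set.add s x)
    simp only [List.foldl_cons, List.length_cons]
    omega

theorem pvHandLen (xs : List Int) : (pvHand xs).length ≤ xs.length := by
  rw [pvHand, PySem.List.length_sorted]
  have := pvFoldAddLen xs []
  simpa [PySem.Set.ofList_eq_foldl] using this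

def getSyuntu (tehai : List Int) : List (List Int) :=
  if (pvHand tehai).length < 3 then []
  else if (PySem.List.pyGetD (pvHand tehai) 2 0 - PySem.List.pyGetD (pvHand tehai) 1 0 == 1)
       && (PySem.List.pyGetD (pvHand tehai) 1 0 - PySem.List.pyGetD (pvHand tehai) 0 0 == 1) then
    -- the `none` arm (Python's ValueError) is unreachable; [] only makes the definition total
    match h : pvRemove3 tehai (PySem.List.pyGetD (pvHand tehai) 0 0)
        (PySem.List.pyGetD (pvHand tehai) 1 0) (PySem.List.pyGetD (pvHand tehai) 2 0) with
    | none => []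
    | some t => [PySem.List.slice (pvHand tehai) (some 0) (some 3)] ++ getSyuntu t
  else getSyuntu (PySem.List.slice (pvHand tehai) (some 1) none)
termination_by tehai.length
decreasing_by
  · exact pvRemove3Len h
  · rw [PySem.List.slice_from_one]
    have := pvHandLen tehai
    simp only [List.length_tail]
    omega

-- ===== PORT B =====
-- the adjacent-dedup loop: 'for v in s: if v != prev: hand.append(v); prev = v'
-- (prev = None before the first element is modelled by Option)
def dedupStep (st : List Int × Option Int) (v : Int) : List Int × Option Int :=
  if st.2 = some v then st else (st.1 ++ [v], some v)

def bHand (s : List Int) : List Int := (s.foldl dedupStep ([], none)).1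

-- the one-pass rebuild: 'for v in s: if skip and v == skip[0]: skip.pop(0) else: t.append(v)'
def skipStep (st : List Int × List Int) (v : Int) : List Int × List Int :=
  match st.2 with
  | [] => (st.1 ++ [v], [])
  | k :: ks => if v = k then (st.1, ks) else (st.1 ++ [v], k :: ks)

def skipPass (s ks : List Int) : List Int := (s.foldl skipStep ([], ks)).1

-- termination helpers (cited by decreasing_by of port B)
theorem pvSkipFoldLen (s : List Int) : ∀ (acc ks : List Int),
    (s.foldl skipStep (acc, ks)).1.length ≤ acc.length + s.length := by
  induction s with
  | nil => intro acc ks; simp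
  | cons v rest ih =>
    intro acc ks
    simp only [List.foldl_cons, List.length_cons]
    rcases ks with _ | ⟨k, ks'⟩
    · have h1 : skipStep (acc, []) v = (acc ++ [v], []) := rfl
      rw [h1]
      have := ih (acc ++ [v]) []
      simp at this ⊢; omega
    · by_cases hv : v = k
      · have h1 : skipStep (acc, k :: ks') v = (acc, ks') := by simp [skipStep, hv]
        rw [h1]
        have := ih acc ks'
        omega
      · have h1 : skipStep (acc, k :: ks') v = (acc ++ [v], k :: ks') := by simp [skipStep, hv]
        rw [h1]
        have := ih (acc ++ [v]) (k :: ks')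
        simp at this ⊢; omega

theorem pvDedupFoldPre (s : List Int) : ∀ (acc : List Int) (p : Option Int),
    ∃ u, (s.foldl dedupStep (acc, p)).1 = acc ++ u ∧
         (s.foldl dedupStep (acc, p)).1.length ≤ acc.length + s.length := by
  induction s with
  | nil => intro acc p; exact ⟨[], by simp⟩
  | cons v rest ih =>
    intro acc p
    simp only [List.foldl_cons]
    by_cases hp : p = some v
    · subst hp
      obtain ⟨u, hu, hl⟩ := ih acc (some v)
      have hstep : dedupStep (acc, some v) v = (acc, some v) := by simp [dedupStep]
      rw [hstep]
      exact ⟨u, hu, by simp at hl ⊢; omega⟩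
    · obtain ⟨u, hu, hl⟩ := ih (acc ++ [v]) (some v)
      have hstep : dedupStep (acc, p) v = (acc ++ [v], some v) := by simp [dedupStep, hp]
      rw [hstep]
      refine ⟨[v] ++ u, by rw [hu]; simp, ?_⟩
      simp at hl ⊢; omega

theorem pvBHandLen (s : List Int) : (bHand s).length ≤ s.length := by
  obtain ⟨u, _, hl⟩ := pvDedupFoldPre s [] none
  simpa [bHand] using hl

theorem pvBHandCons (v : Int) (rest : List Int) :
    ∃ u, bHand (v :: rest) = v :: u := by
  obtain ⟨u, hu, _⟩ := pvDedupFoldPre rest [v] (some v)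
  exact ⟨u, by simpa [bHand, dedupStep] using hu⟩

theorem pvSkipLt (s : List Int) (h3 : ¬ (bHand s).length < 3) (b c : Int) :
    (skipPass s [PySem.List.pyGetD (bHand s) 0 0, b, c]).length < s.length := by
  match s with
  | [] => simp [bHand] at h3
  | v :: rest =>
    obtain ⟨u, hu⟩ := pvBHandCons v rest
    rw [hu]
    have ha : PySem.List.pyGetD (v :: u) 0 0 = v := by
      rw [PySem.List.pyGetD_ofNat']; rfl
    rw [ha]
    show (List.foldl skipStep (skipStep ([], [v, b, c]) v) rest).1.length < rest.length + 1
    have hstep : skipStep (([] : List Int), [v, b, c]) v = ([], [b, c]) := by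
      simp [skipStep]
    rw [hstep]
    have := pvSkipFoldLen rest [] [b, c]
    simp at this ⊢; omega

def getSyuntuLoopB (s : List Int) (result : List (List Int)) : List (List Int) :=
  if h3 : (bHand s).length < 3 then result
  else if (PySem.List.pyGetD (bHand s) 1 0 - PySem.List.pyGetD (bHand s) 0 0 == 1)
       && (PySem.List.pyGetD (bHand s) 2 0 - PySem.List.pyGetD (bHand s) 1 0 == 1) then
    getSyuntuLoopB
      (skipPass s [PySem.List.pyGetD (bHand s) 0 0, PySem.List.pyGetD (bHand s) 1 0,
        PySem.List.pyGetD (bHand s) 2 0])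
      (result ++ [[PySem.List.pyGetD (bHand s) 0 0, PySem.List.pyGetD (bHand s) 1 0,
        PySem.List.pyGetD (bHand s) 2 0]])
  else getSyuntuLoopB (PySem.List.slice (bHand s) (some 1) none) result
termination_by s.length
decreasing_by
  · exact pvSkipLt s h3 _ _
  · rw [PySem.List.slice_from_one]
    have := pvBHandLen s
    simp only [List.length_tail]
    omega

def getSyuntu_alt (tehai : List Int) : List (List Int) :=
  getSyuntuLoopB (PySem.List.sorted tehai (fun x => x) false) []

-- ===== PRECONDITION & SPEC =====
def Spec_getSyuntu (tehai : List Int) (out : List (List Int)) : Prop := out = getSyuntu_alt tehai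
instance (tehai : List Int) (out : List (List Int)) : Decidable (Spec_getSyuntu tehai out) := by unfold Spec_getSyuntu; infer_instance

-- ===== CLAIM (what is proved, stated in full; the proofs are below) =====
def Claim_equal_getSyuntu : Prop := ∀ (tehai : List Int), Dom_getSyuntu tehai → Spec_getSyuntu tehai (getSyuntu tehai)

-- ===== LEMMAS AND PROOFS =====

-- ---- facts about A's hand ----
theorem pvHandMem (xs : List Int) (x : Int) : x ∈ pvHand xs ↔ x ∈ xs := by
  rw [pvHand, PySem.List.mem_sorted, PySem.Set.mem_ofList]

theorem pvHandPairwise (xs : List Int) : (pvHand xs).Pairwise (· < ·) := by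
  have hle : (pvHand xs).Pairwise (· ≤ ·) := PySem.List.sorted_pairwise _ _
  have hnd : (pvHand xs).Nodup :=
    ((PySem.List.sorted_perm (PySem.Set.ofList xs) (fun x => x) false).nodup_iff).mpr
      (PySem.Set.nodup_ofList xs)
  exact (hle.and hnd).imp (fun h => lt_of_le_of_ne h.1 h.2)

theorem pvHandPermCongr {xs ys : List Int} (h : xs.Perm ys) : pvHand xs = pvHand ys := by
  conv_lhs => rw [pvHand]
  refine PySem.List.sorted_eq_of_perm_of_pairwise_lt _ _ _ ?_ (pvHandPairwise ys)
  refine ((PySem.List.sorted_perm _ _ _).trans ?_)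
  refine (List.perm_ext_iff_of_nodup (PySem.Set.nodup_ofList ys) (PySem.Set.nodup_ofList xs)).mpr ?_
  intro a
  rw [PySem.Set.mem_ofList, PySem.Set.mem_ofList, h.mem_iff]

-- first three elements of a list of length ≥ 3, in pyGetD form
theorem pvTake3 (l : List Int) (h : ¬ l.length < 3) :
    l.take 3 = [PySem.List.pyGetD l 0 0, PySem.List.pyGetD l 1 0, PySem.List.pyGetD l 2 0] ∧
    PySem.List.pyGetD l 0 0 ∈ l ∧ PySem.List.pyGetD l 1 0 ∈ l ∧ PySem.List.pyGetD l 2 0 ∈ l := by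
  rcases l with _ | ⟨x, _ | ⟨y, _ | ⟨z, r⟩⟩⟩
  · simp at h
  · simp at h
  · simp at h
  · simp [PySem.List.pyGetD_ofNat']

theorem pvRemove3Some {xs : List Int} {a b c : Int} (ha : a ∈ xs) (hb : b ∈ xs) (hc : c ∈ xs)
    (hab : a < b) (hbc : b < c) :
    pvRemove3 xs a b c = some (((xs.erase a).erase b).erase c) := by
  have hb' : b ∈ xs.erase a := (List.mem_erase_of_ne (by omega)).mpr hb
  have hc' : c ∈ (xs.erase a).erase b :=
    (List.mem_erase_of_ne (by omega)).mpr ((List.mem_erase_of_ne (by omega)).mpr hc)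
  rw [pvRemove3, PySem.List.remove?_eq_some_erase xs a ha]
  simp only [Option.bind_some]
  rw [PySem.List.remove?_eq_some_erase _ b hb']
  simp only [Option.bind_some]
  rw [PySem.List.remove?_eq_some_erase _ c hc']

-- ---- A is invariant under permutation of its input ----
theorem pvGetSyuntuPerm (n : Nat) : ∀ xs ys : List Int, xs.length ≤ n → xs.Perm ys →
    getSyuntu xs = getSyuntu ys := by
  induction n with
  | zero =>
    intro xs ys hl hp
    have hx : xs = [] := List.length_eq_zero_iff.mp (Nat.le_zero.mp hl)
    subst hx
    have hy : ys = [] := hp.symm.eq_nil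
    subst hy; rfl
  | succ n ih =>
    intro xs ys hl hp
    have hH : pvHand xs = pvHand ys := pvHandPermCongr hp
    conv_lhs => rw [getSyuntu]
    conv_rhs => rw [getSyuntu]
    rw [hH]
    by_cases h3 : (pvHand ys).length < 3
    · simp [h3]
    · simp only [if_neg h3]
      by_cases hcond : ((PySem.List.pyGetD (pvHand ys) 2 0 - PySem.List.pyGetD (pvHand ys) 1 0 == 1)
          && (PySem.List.pyGetD (pvHand ys) 1 0 - PySem.List.pyGetD (pvHand ys) 0 0 == 1)) = true
      · simp only [if_pos hcond]
        obtain ⟨_, hm0, hm1, hm2⟩ := pvTake3 (pvHand ys) h3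
        simp only [Bool.and_eq_true, beq_iff_eq] at hcond
        have hab : PySem.List.pyGetD (pvHand ys) 0 0 < PySem.List.pyGetD (pvHand ys) 1 0 := by omega
        have hbc : PySem.List.pyGetD (pvHand ys) 1 0 < PySem.List.pyGetD (pvHand ys) 2 0 := by omega
        have hax : PySem.List.pyGetD (pvHand ys) 0 0 ∈ xs := by
          rw [hp.mem_iff]; exact (pvHandMem ys _).mp hm0
        have hbx : PySem.List.pyGetD (pvHand ys) 1 0 ∈ xs := by
          rw [hp.mem_iff]; exact (pvHandMem ys _).mp hm1
        have hcx : PySem.List.pyGetD (pvHand ys) 2 0 ∈ xs := by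
          rw [hp.mem_iff]; exact (pvHandMem ys _).mp hm2
        have hay : PySem.List.pyGetD (pvHand ys) 0 0 ∈ ys := (pvHandMem ys _).mp hm0
        have hby : PySem.List.pyGetD (pvHand ys) 1 0 ∈ ys := (pvHandMem ys _).mp hm1
        have hcy : PySem.List.pyGetD (pvHand ys) 2 0 ∈ ys := (pvHandMem ys _).mp hm2
        have ex := pvRemove3Some hax hbx hcx hab hbc
        have ey := pvRemove3Some hay hby hcy hab hbc
        split
        · rename_i heq; rw [ex] at heq; cases heq
        · rename_i tx htx
          rw [ex] at htx; injection htx with htx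
          split
          · rename_i heq; rw [ey] at heq; cases heq
          · rename_i ty hty
            rw [ey] at hty; injection hty with hty
            have hperm : tx.Perm ty := by
              rw [← htx, ← hty]
              exact ((hp.erase _).erase _).erase _
            have hlx : tx.length ≤ n := by
              have h1 : (xs.erase (PySem.List.pyGetD (pvHand ys) 0 0)).length = xs.length - 1 :=
                List.length_erase_of_mem hax
              have h2 := (List.erase_sublist (l := xs.erase (PySem.List.pyGetD (pvHand ys) 0 0))
                (a := PySem.List.pyGetD (pvHand ys) 1 0)).length_le
              have h3 := (List.erase_sublist
                (l := (xs.erase (PySem.List.pyGetD (pvHand ys) 0 0)).erase (PySem.List.pyGetD (pvHand ys) 1 0))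
                (a := PySem.List.pyGetD (pvHand ys) 2 0)).length_le
              have h4 : 0 < xs.length := List.length_pos_of_mem hax
              rw [← htx]; omega
            rw [ih tx ty hlx hperm]
      · simp only [if_neg hcond]

-- ---- B's adjacent-dedup of a sorted list is A's sorted(set(·)) ----
theorem pvDedupFoldSpec (s : List Int) : ∀ (acc : List Int) (q : Int),
    List.Pairwise (· ≤ ·) s → (∀ x ∈ s, q ≤ x) → (acc ++ [q]).Pairwise (· < ·) →
    ((s.foldl dedupStep (acc ++ [q], some q)).1.Pairwise (· < ·) ∧
     ∀ x, x ∈ (s.foldl dedupStep (acc ++ [q], some q)).1 ↔ x ∈ acc ++ [q] ∨ x ∈ s) := by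
  induction s with
  | nil => intro acc q _ _ hpw; exact ⟨hpw, by simp⟩
  | cons v rest ih =>
    intro acc q hs hq hpw
    obtain ⟨hv, hrest⟩ := List.pairwise_cons.mp hs
    have hqv : q ≤ v := hq v List.mem_cons_self
    simp only [List.foldl_cons]
    by_cases hvq : q = v
    · subst hvq
      have hstep : dedupStep (acc ++ [q], some q) q = (acc ++ [q], some q) := by
        simp [dedupStep]
      rw [hstep]
      obtain ⟨h1, h2⟩ := ih acc q hrest hv hpw
      refine ⟨h1, fun x => ?_⟩
      rw [h2 x]
      simp only [List.mem_append, List.mem_cons]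
      tauto
    · have hlt : q < v := lt_of_le_of_ne hqv hvq
      have hstep : dedupStep (acc ++ [q], some q) v = ((acc ++ [q]) ++ [v], some v) := by
        simp [dedupStep, hvq]
      rw [hstep]
      have hpw' : ((acc ++ [q]) ++ [v]).Pairwise (· < ·) := by
        rw [List.pairwise_append]
        refine ⟨hpw, by simp, ?_⟩
        intro x hx y hy
        simp only [List.mem_singleton] at hy
        subst hy
        rcases List.mem_append.mp hx with hxa | hxq
        · have : x < q := (List.pairwise_append.mp hpw).2.2 x hxa q (by simp)
          omega
        · simp only [List.mem_singleton] at hxq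
          subst hxq; exact hlt
      obtain ⟨h1, h2⟩ := ih (acc ++ [q]) v hrest hv hpw'
      refine ⟨h1, fun x => ?_⟩
      rw [h2 x]
      simp only [List.mem_append, List.mem_cons]
      tauto

theorem pvBHandSpec {s : List Int} (hs : List.Pairwise (· ≤ ·) s) :
    (bHand s).Pairwise (· < ·) ∧ ∀ x, x ∈ bHand s ↔ x ∈ s := by
  rcases s with _ | ⟨v, rest⟩
  · exact ⟨by simp [bHand], by simp [bHand]⟩
  · obtain ⟨hv, hrest⟩ := List.pairwise_cons.mp hs
    have hstep : bHand (v :: rest) = (rest.foldl dedupStep ([] ++ [v], some v)).1 := by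
      simp [bHand, dedupStep]
    obtain ⟨h1, h2⟩ := pvDedupFoldSpec rest [] v hrest hv (by simp)
    rw [hstep]
    refine ⟨h1, fun x => ?_⟩
    rw [h2 x]; simp

theorem pvBHandEq {s : List Int} (hs : List.Pairwise (· ≤ ·) s) : bHand s = pvHand s := by
  obtain ⟨hpw, hmem⟩ := pvBHandSpec hs
  rw [pvHand]
  refine (PySem.List.sorted_eq_of_perm_of_pairwise_lt _ _ _ ?_ hpw).symm
  refine (List.perm_ext_iff_of_nodup (hpw.imp fun h => ne_of_lt h) (PySem.Set.nodup_ofList s)).mpr ?_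
  intro a
  rw [hmem a, PySem.Set.mem_ofList]

-- ---- B's one-pass skip rebuild is A's three .remove calls, on a sorted state ----
theorem pvSkipFoldPre (s : List Int) : ∀ (acc ks : List Int),
    s.foldl skipStep (acc, ks) =
      (acc ++ (s.foldl skipStep ([], ks)).1, (s.foldl skipStep ([], ks)).2) := by
  induction s with
  | nil => intro acc ks; simp
  | cons v rest ih =>
    intro acc ks
    simp only [List.foldl_cons]
    rcases ks with _ | ⟨k, ks'⟩
    · have h1 : skipStep (acc, []) v = (acc ++ [v], []) := rfl
      have h2 : skipStep (([] : List Int), []) v = ([v], []) := rfl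
      rw [h1, h2, ih (acc ++ [v]) [], ih [v] []]
      simp
    · by_cases hv : v = k
      · have h1 : skipStep (acc, k :: ks') v = (acc, ks') := by simp [skipStep, hv]
        have h2 : skipStep (([] : List Int), k :: ks') v = ([], ks') := by simp [skipStep, hv]
        rw [h1, h2]
        exact ih acc ks'
      · have h1 : skipStep (acc, k :: ks') v = (acc ++ [v], k :: ks') := by simp [skipStep, hv]
        have h2 : skipStep (([] : List Int), k :: ks') v = ([v], k :: ks') := by simp [skipStep, hv]
        rw [h1, h2, ih (acc ++ [v]) (k :: ks'), ih [v] (k :: ks')]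
        simp

theorem pvSkipPassEmpty (s : List Int) : skipPass s [] = s := by
  induction s with
  | nil => rfl
  | cons v rest ih =>
    show (List.foldl skipStep (skipStep ([], []) v) rest).1 = v :: rest
    have hstep : skipStep (([] : List Int), ([] : List Int)) v = ([v], []) := rfl
    rw [hstep, pvSkipFoldPre rest [v] []]
    simpa [skipPass] using ih

theorem pvSkipPassConsEq (v : Int) (rest ks : List Int) :
    skipPass (v :: rest) (v :: ks) = skipPass rest ks := by
  simp [skipPass, skipStep]

theorem pvSkipPassConsNe {v k : Int} (h : v ≠ k) (rest ks : List Int) :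
    skipPass (v :: rest) (k :: ks) = v :: skipPass rest (k :: ks) := by
  show (List.foldl skipStep (skipStep ([], k :: ks) v) rest).1 = _
  have hstep : skipStep (([] : List Int), k :: ks) v = ([v], k :: ks) := by
    simp [skipStep, h]
  rw [hstep, pvSkipFoldPre rest [v] (k :: ks)]
  simp [skipPass]

theorem pvSkipPassSublist (s : List Int) : ∀ ks, (skipPass s ks).Sublist s := by
  induction s with
  | nil => intro ks; simp [skipPass]
  | cons v rest ih =>
    intro ks
    rcases ks with _ | ⟨k, ks'⟩
    · rw [pvSkipPassEmpty]
    · by_cases hv : v = k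
      · subst hv
        rw [pvSkipPassConsEq]
        exact (ih ks').cons v
      · rw [pvSkipPassConsNe hv]
        exact (ih (k :: ks')).cons₂ v

theorem pvSkip1 {a : Int} (s : List Int) (ha : a ∈ s) : skipPass s [a] = s.erase a := by
  induction s with
  | nil => cases ha
  | cons v rest ih =>
    by_cases hv : v = a
    · subst hv
      rw [pvSkipPassConsEq, pvSkipPassEmpty, List.erase_cons_head]
    · have ha' : a ∈ rest := by
        rcases List.mem_cons.mp ha with h | h
        · exact absurd h.symm hv
        · exact h
      rw [pvSkipPassConsNe hv, ih ha', List.erase_cons_tail (by simp [hv])]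

theorem pvSkip2 {a b : Int} (s : List Int) (hs : List.Pairwise (· ≤ ·) s) (hab : a < b)
    (ha : a ∈ s) (hb : b ∈ s) : skipPass s [a, b] = (s.erase a).erase b := by
  induction s with
  | nil => cases ha
  | cons v rest ih =>
    obtain ⟨hv_le, hrest⟩ := List.pairwise_cons.mp hs
    by_cases hv : v = a
    · subst hv
      have hb' : b ∈ rest := by
        rcases List.mem_cons.mp hb with h | h
        · omega
        · exact h
      rw [pvSkipPassConsEq, pvSkip1 rest hb', List.erase_cons_head]
    · have ha' : a ∈ rest := by
        rcases List.mem_cons.mp ha with h | h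
        · exact absurd h.symm hv
        · exact h
      have hva : v < a := lt_of_le_of_ne (hv_le a ha') hv
      have hb' : b ∈ rest := by
        rcases List.mem_cons.mp hb with h | h
        · omega
        · exact h
      rw [pvSkipPassConsNe hv, ih hrest ha' hb',
        List.erase_cons_tail (by simp; omega), List.erase_cons_tail (by simp; omega)]

theorem pvSkip3 {a b c : Int} (s : List Int) (hs : List.Pairwise (· ≤ ·) s) (hab : a < b)
    (hbc : b < c) (ha : a ∈ s) (hb : b ∈ s) (hc : c ∈ s) :
    skipPass s [a, b, c] = ((s.erase a).erase b).erase c := by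
  induction s with
  | nil => cases ha
  | cons v rest ih =>
    obtain ⟨hv_le, hrest⟩ := List.pairwise_cons.mp hs
    by_cases hv : v = a
    · subst hv
      have hb' : b ∈ rest := by
        rcases List.mem_cons.mp hb with h | h
        · omega
        · exact h
      have hc' : c ∈ rest := by
        rcases List.mem_cons.mp hc with h | h
        · omega
        · exact h
      rw [pvSkipPassConsEq, pvSkip2 rest hrest hbc hb' hc', List.erase_cons_head]
    · have ha' : a ∈ rest := by
        rcases List.mem_cons.mp ha with h | h
        · exact absurd h.symm hv
        · exact h
      have hva : v < a := lt_of_le_of_ne (hv_le a ha') hv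
      have hb' : b ∈ rest := by
        rcases List.mem_cons.mp hb with h | h
        · omega
        · exact h
      have hc' : c ∈ rest := by
        rcases List.mem_cons.mp hc with h | h
        · omega
        · exact h
      rw [pvSkipPassConsNe hv, ih hrest ha' hb' hc',
        List.erase_cons_tail (by simp; omega), List.erase_cons_tail (by simp; omega),
        List.erase_cons_tail (by simp; omega)]

-- ---- the main loop invariant: B's loop on a sorted state computes A's recursion ----
theorem pvLoopBEq (n : Nat) : ∀ (s : List Int) (result : List (List Int)),
    s.length ≤ n → List.Pairwise (· ≤ ·) s →
    getSyuntuLoopB s result = result ++ getSyuntu s := by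
  induction n with
  | zero =>
    intro s result hl _
    have hs : s = [] := List.length_eq_zero_iff.mp (Nat.le_zero.mp hl)
    subst hs
    rw [getSyuntuLoopB, getSyuntu]
    simp [bHand, pvHand, PySem.Set.ofList]
  | succ n ih =>
    intro s result hl hs
    have hbh : bHand s = pvHand s := pvBHandEq hs
    rw [getSyuntuLoopB, getSyuntu, hbh]
    by_cases h3 : (pvHand s).length < 3
    · simp [h3]
    · simp only [dif_neg h3, if_neg h3]
      rw [Bool.and_comm]
      by_cases hcond : ((PySem.List.pyGetD (pvHand s) 2 0 - PySem.List.pyGetD (pvHand s) 1 0 == 1)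
          && (PySem.List.pyGetD (pvHand s) 1 0 - PySem.List.pyGetD (pvHand s) 0 0 == 1)) = true
      · simp only [if_pos hcond]
        obtain ⟨htake, hm0, hm1, hm2⟩ := pvTake3 (pvHand s) h3
        simp only [Bool.and_eq_true, beq_iff_eq] at hcond
        have hab : PySem.List.pyGetD (pvHand s) 0 0 < PySem.List.pyGetD (pvHand s) 1 0 := by omega
        have hbc : PySem.List.pyGetD (pvHand s) 1 0 < PySem.List.pyGetD (pvHand s) 2 0 := by omega
        have has : PySem.List.pyGetD (pvHand s) 0 0 ∈ s := (pvHandMem s _).mp hm0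
        have hbs : PySem.List.pyGetD (pvHand s) 1 0 ∈ s := (pvHandMem s _).mp hm1
        have hcs : PySem.List.pyGetD (pvHand s) 2 0 ∈ s := (pvHandMem s _).mp hm2
        have hskip := pvSkip3 s hs hab hbc has hbs hcs
        have hrem := pvRemove3Some has hbs hcs hab hbc
        -- the slice [hand[0:3]] is the triple B appends
        have hslice : PySem.List.slice (pvHand s) (some 0) (some 3) =
            [PySem.List.pyGetD (pvHand s) 0 0, PySem.List.pyGetD (pvHand s) 1 0,
             PySem.List.pyGetD (pvHand s) 2 0] := by
          rw [PySem.List.slice_zero_start, PySem.List.slice_to _ (by norm_num)]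
          simpa using htake
        split
        · rename_i heq; rw [hrem] at heq; cases heq
        · rename_i t ht
          rw [hrem] at ht; injection ht with ht
          have hlen : t.length ≤ n := by
            have h1 : (s.erase (PySem.List.pyGetD (pvHand s) 0 0)).length = s.length - 1 :=
              List.length_erase_of_mem has
            have h2 := (List.erase_sublist (l := s.erase (PySem.List.pyGetD (pvHand s) 0 0))
              (a := PySem.List.pyGetD (pvHand s) 1 0)).length_le
            have h4 := (List.erase_sublist
              (l := (s.erase (PySem.List.pyGetD (pvHand s) 0 0)).erase (PySem.List.pyGetD (pvHand s) 1 0))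
              (a := PySem.List.pyGetD (pvHand s) 2 0)).length_le
            have h5 : 0 < s.length := List.length_pos_of_mem has
            rw [← ht]; omega
          have hsorted : List.Pairwise (· ≤ ·) t := by
            rw [← ht, ← hskip]
            exact hs.sublist (pvSkipPassSublist s _)
          rw [hskip, ht, ih t _ hlen hsorted, hslice]
          simp
      · simp only [if_neg hcond]
        have htail : PySem.List.slice (pvHand s) (some 1) none = (pvHand s).tail :=
          PySem.List.slice_from_one _
        have hsorted : List.Pairwise (· ≤ ·) (PySem.List.slice (pvHand s) (some 1) none) := by
          rw [htail]
          exact ((pvHandPairwise s).sublist (List.tail_sublist _)).imp fun h => le_of_lt h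
        have hlen : (PySem.List.slice (pvHand s) (some 1) none).length ≤ n := by
          rw [htail, List.length_tail]
          have := pvHandLen s
          omega
        exact ih _ result hlen hsorted

-- ===== VERDICT (by name: the statement is the Claim_ definition above) =====
theorem getSyuntu_spec : Claim_equal_getSyuntu := by
  intro tehai _
  unfold Spec_getSyuntu getSyuntu_alt
  have hsorted : List.Pairwise (· ≤ ·) (PySem.List.sorted tehai (fun x => x) false) :=
    PySem.List.sorted_pairwise tehai (fun x => x)
  rw [pvLoopBEq (PySem.List.sorted tehai (fun x => x) false).length _ [] le_rfl hsorted,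
    List.nil_append]
  exact pvGetSyuntuPerm tehai.length tehai _ le_rfl (PySem.List.sorted_perm _ _ _).symm
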